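-- pv_equiv track=rewrite | github.com/Reungwit/webdoc | webdoc/man_doc/textpydoc.py | compare_sets
-- ===== SOURCE A (Python) =====
-- def compare_sets(results_dict):
--     """
--     สรุปความต่างแบบง่ายด้วยเซ็ต:
--     - unique ของแต่ละเอนจิน (โทเค็นที่เอนจินหนึ่งมี แต่อีกเอนจินไม่มี)
--     หมายเหตุ: ใช้ set จะไม่รักษาลำดับ แต่ช่วยชี้ให้เห็นโทเค็นที่ต่างกันชัด ๆ
--     """
--     engines = list(results_dict.keys())
--     sets = {e: set(results_dict[e]) for e in engines}
--     union_all = set().union(*sets.values())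
--     summary = {}
--     for e in engines:
--         others = set().union(*(sets[oe] for oe in engines if oe != e))
--         summary[e] = sorted(list(sets[e] - others), key=lambda s: (len(s), s))
--     return summary, union_all
-- ===== SOURCE B (Python) =====
-- def compare_sets(results_dict):
--     # One pass: table each distinct token -> (number of engines containing it,
--     # the first engine that had it); union is the table's keys, and a token is
--     # unique to engine e exactly when its count is 1 and its owner is e.
--     occ = {}
--     for e, toks in results_dict.items():
--         for t in set(toks):
--             occ[t] = (occ[t][0] + 1, occ[t][1]) if t in occ else (1, e)
--     union_all = set(occ.keys())
--     summary = {}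
--     for e in results_dict:
--         summary[e] = sorted((t for t, (c, own) in occ.items() if c == 1 and own == e),
--                             key=lambda s: (len(s), s))
--     return summary, union_all
-- ===== Notes on version B (the rewrite author's own statement) =====
-- stated objective: faster
-- what changed: Replaces A's per-engine recomputation of the union of all other engines (set unions + set difference per engine) with a single pass that builds an occurrence table token -> (engine count, first engine); union is the table's keys and a token is unique to e iff count==1 and owner==e, sorted with the same (len, s) key.
import Mathlib
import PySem

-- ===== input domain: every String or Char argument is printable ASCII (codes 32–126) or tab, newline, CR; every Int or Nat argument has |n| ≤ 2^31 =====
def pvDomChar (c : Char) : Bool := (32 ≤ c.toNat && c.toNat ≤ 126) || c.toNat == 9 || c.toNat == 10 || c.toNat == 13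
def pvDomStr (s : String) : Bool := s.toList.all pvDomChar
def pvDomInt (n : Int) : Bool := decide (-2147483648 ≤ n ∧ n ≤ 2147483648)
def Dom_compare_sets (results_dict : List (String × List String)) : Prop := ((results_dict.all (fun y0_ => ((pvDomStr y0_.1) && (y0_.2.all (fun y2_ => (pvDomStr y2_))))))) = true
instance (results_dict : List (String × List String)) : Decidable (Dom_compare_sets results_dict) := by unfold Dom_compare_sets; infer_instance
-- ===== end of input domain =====

-- B replaces A's per-engine "union of all OTHER engines, then set difference" rescans by one
-- occurrence table (token -> engine count, first engine) built in a single pass; same results.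

-- ===== PORT A =====
-- set().union(*ls): left fold of set-union
def pvUnionFold (ls : List (PySem.Set String)) (s : PySem.Set String) : PySem.Set String :=
  ls.foldl (fun u v => PySem.Set.union u v) s

-- sets = {e: set(results_dict[e]) for e in engines}
def pvSets (d : PySem.Dict String (List String)) : PySem.Dict String (PySem.Set String) :=
  d.keys.foldl (fun acc e => acc.insert e (PySem.Set.ofList (d.getD e []))) PySem.Dict.empty

-- others = set().union(*(sets[oe] for oe in engines if oe != e))
def pvOthers (d : PySem.Dict String (List String)) (e : String) : PySem.Set String :=
  pvUnionFold ((d.keys.filter (fun oe => oe != e)).map (fun oe => (pvSets d).getD oe []))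
    PySem.Set.empty

-- sorted(xs, key=lambda s: (len(s), s))
def pvSortKey (xs : List String) : List String :=
  PySem.List.sorted2 xs (fun s => PySem.Str.len s) (fun s => s)

def compare_sets (results_dict : List (String × List String)) : (List (String × List String)) × List String :=
  let d := PySem.Dict.ofList results_dict
  let engines := d.keys
  let sets := pvSets d
  let union_all := pvUnionFold sets.values PySem.Set.empty
  let summary : PySem.Dict String (List String) :=
    engines.foldl (fun sm e =>
      sm.insert e (pvSortKey (PySem.Set.diff (sets.getD e []) (pvOthers d e))))
      PySem.Dict.empty
  (summary.items, union_all)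

-- ===== PORT B =====
-- occ[t] = (occ[t][0] + 1, occ[t][1]) if t in occ else (1, e)   (get? = some ↔ t in occ)
def pvOcc (d : PySem.Dict String (List String)) : PySem.Dict String (Int × String) :=
  d.items.foldl (fun occ p =>
    (PySem.Set.ofList p.2).foldl (fun occ t =>
      occ.insert t (match occ.get? t with
        | some co => (co.1 + 1, co.2)
        | none => (1, p.1))) occ) PySem.Dict.empty

def compare_sets_alt (results_dict : List (String × List String)) : (List (String × List String)) × List String :=
  let d := PySem.Dict.ofList results_dict
  let occ := pvOcc d
  -- union_all = set(occ.keys())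
  let union_all := PySem.Set.ofList occ.keys
  -- summary[e] = sorted((t for t,(c,own) in occ.items() if c == 1 and own == e), key=(len, s))
  let summary : PySem.Dict String (List String) :=
    d.items.foldl (fun sm p =>
      sm.insert p.1 (pvSortKey
        ((occ.items.filter (fun q => q.2.1 == 1 && q.2.2 == p.1)).map (fun q => q.1))))
      PySem.Dict.empty
  (summary.items, union_all)

-- ===== PRECONDITION & SPEC =====
def Spec_compare_sets (results_dict : List (String × List String)) (out : (List (String × List String)) × List String) : Prop := out = compare_sets_alt results_dict
instance (results_dict : List (String × List String)) (out : (List (String × List String)) × List String) : Decidable (Spec_compare_sets results_dict out) := by unfold Spec_compare_sets; infer_instance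

-- ===== CLAIM (what is proved, stated in full; the proofs are below) =====
def Claim_equal_compare_sets : Prop := ∀ (results_dict : List (String × List String)), Dom_compare_sets results_dict → Spec_compare_sets results_dict (compare_sets results_dict)

-- ===== LEMMAS AND PROOFS =====

-- The (len, s) sort key, as a ≤-relation on strings
def pvLe (a b : String) : Prop :=
  a.toList.length < b.toList.length ∨ (a.toList.length = b.toList.length ∧ a ≤ b)

theorem pvLe_antisymm {a b : String} (h1 : pvLe a b) (h2 : pvLe b a) : a = b := by
  rcases h1 with h1 | ⟨_, h1⟩ <;> rcases h2 with h2 | ⟨_, h2⟩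
  · omega
  · omega
  · omega
  · exact le_antisymm h1 h2

theorem pvLe_trans {a b c : String} (h1 : pvLe a b) (h2 : pvLe b c) : pvLe a c := by
  rcases h1 with h1 | ⟨e1, h1⟩ <;> rcases h2 with h2 | ⟨e2, h2⟩
  · exact Or.inl (h1.trans h2)
  · exact Or.inl (e2 ▸ h1)
  · exact Or.inl (e1 ▸ h2)
  · exact Or.inr ⟨e1.trans e2, h1.trans h2⟩

-- abbreviation for sorted2's comparison boolean on (Str.len, id)
def pvBefore (a b : String) : Bool :=
  decide (PySem.Str.len a < PySem.Str.len b) ||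
    (!decide (PySem.Str.len b < PySem.Str.len a) && decide (a < b))

theorem pvBefore_le {a b : String} (h : pvBefore a b = true) : pvLe a b := by
  unfold pvBefore at h
  simp only [PySem.Str.len_eq, Bool.or_eq_true, Bool.and_eq_true, Bool.not_eq_true',
    decide_eq_true_eq, decide_eq_false_iff_not, Nat.cast_lt, not_lt] at h
  rcases h with h | ⟨h1, h2⟩
  · exact Or.inl h
  · rcases lt_or_eq_of_le h1 with h1 | h1
    · exact Or.inl h1
    · exact Or.inr ⟨h1, le_of_lt h2⟩

theorem pvBefore_false_le {a b : String} (h : pvBefore a b = false) : pvLe b a := by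
  unfold pvBefore at h
  simp only [PySem.Str.len_eq, Bool.or_eq_false_iff, Bool.and_eq_false_iff, Bool.not_eq_false',
    decide_eq_false_iff_not, decide_eq_true_eq, Nat.cast_lt, not_lt] at h
  obtain ⟨h1, h2⟩ := h
  rcases h2 with h2 | h2
  · exact Or.inl h2
  · rcases lt_or_eq_of_le h1 with h3 | h3
    · exact Or.inl h3
    · exact Or.inr ⟨h3, not_lt.mp h2⟩

theorem pairwise_insertBy {x : String} {ys : List String}
    (h : ys.Pairwise pvLe) : (PySem.List.insertBy pvBefore x ys).Pairwise pvLe := by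
  induction ys with
  | nil => simp [PySem.List.insertBy]
  | cons y ys ih =>
    rw [show PySem.List.insertBy pvBefore x (y :: ys)
        = if pvBefore x y = true then x :: y :: ys
          else y :: PySem.List.insertBy pvBefore x ys from rfl]
    rcases List.pairwise_cons.mp h with ⟨hy, hys⟩
    split_ifs with hb
    · refine List.pairwise_cons.mpr ⟨?_, h⟩
      intro z hz
      rcases List.mem_cons.mp hz with rfl | hz
      · exact pvBefore_le hb
      · exact pvLe_trans (pvBefore_le hb) (hy z hz)
    · refine List.pairwise_cons.mpr ⟨?_, ih hys⟩
      intro z hz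
      rcases (PySem.List.mem_insertBy pvBefore x z ys).mp hz with rfl | hz
      · exact pvBefore_false_le (Bool.eq_false_iff.mpr hb)
      · exact hy z hz

theorem pairwise_foldl_insertBy (xs : List String) (acc : List String)
    (h : acc.Pairwise pvLe) :
    (xs.foldl (fun acc x => PySem.List.insertBy pvBefore x acc) acc).Pairwise pvLe := by
  induction xs generalizing acc with
  | nil => exact h
  | cons x xs ih => exact ih _ (pairwise_insertBy h)

theorem pairwise_sorted2 (xs : List String) :
    (pvSortKey xs).Pairwise pvLe := by
  have hrfl : pvSortKey xs
      = xs.foldl (fun acc x => PySem.List.insertBy pvBefore x acc) [] := rfl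
  rw [hrfl]
  exact pairwise_foldl_insertBy xs [] (by simp)

theorem sorted2_eq_of_perm {xs ys : List String} (h : xs.Perm ys) :
    pvSortKey xs = pvSortKey ys := by
  refine List.Perm.eq_of_pairwise (fun a b _ _ h1 h2 => pvLe_antisymm h1 h2)
    (pairwise_sorted2 xs) (pairwise_sorted2 ys) ?_
  exact (PySem.List.sorted2_perm xs _ _ false).trans
    (h.trans (PySem.List.sorted2_perm ys _ _ false).symm)

-- membership in a left fold of set-unions
theorem mem_foldl_union (ls : List (List String)) (s : List String) (x : String) :
    x ∈ ls.foldl (fun u v => PySem.Set.union u v) s ↔ x ∈ s ∨ ∃ l ∈ ls, x ∈ l := by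
  induction ls generalizing s with
  | nil => simp
  | cons hd tl ih =>
    simp only [List.foldl_cons, ih, PySem.Set.mem_union, List.mem_cons]
    constructor
    · rintro (( h | h) | ⟨l, hl, hx⟩)
      · exact Or.inl h
      · exact Or.inr ⟨hd, Or.inl rfl, h⟩
      · exact Or.inr ⟨l, Or.inr hl, hx⟩
    · rintro (h | ⟨l, (rfl | hl), hx⟩)
      · exact Or.inl (Or.inl h)
      · exact Or.inl (Or.inr hx)
      · exact Or.inr ⟨l, hl, hx⟩

-- a fold of inserts over keys not containing k leaves get? k unchanged
theorem get?_foldl_insert_not_mem {ν : Type} (g : String → ν) (l : List String)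
    (d : PySem.Dict String ν) (k : String) (hk : k ∉ l) :
    (l.foldl (fun acc e => acc.insert e (g e)) d).get? k = d.get? k := by
  induction l generalizing d with
  | nil => rfl
  | cons hd tl ih =>
    simp only [List.mem_cons, not_or] at hk
    simp only [List.foldl_cons]
    rw [ih _ hk.2, PySem.Dict.get?_insert_of_ne _ _ hk.1]

theorem getD_foldl_insert_self {ν : Type} (g : String → ν) (l : List String)
    (d : PySem.Dict String ν) (k : String) (dflt : ν) (hnd : l.Nodup) (hk : k ∈ l) :
    (l.foldl (fun acc e => acc.insert e (g e)) d).getD k dflt = g k := by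
  induction l generalizing d with
  | nil => cases hk
  | cons hd tl ih =>
    rcases List.mem_cons.mp hk with rfl | hk
    · simp only [List.foldl_cons]
      rw [PySem.Dict.getD_of_get?_eq_some _ dflt]
      rw [get?_foldl_insert_not_mem _ _ _ _ (List.nodup_cons.mp hnd).1]
      exact PySem.Dict.get?_insert_self _ _ _
    · exact ih _ (List.nodup_cons.mp hnd).2 hk

-- bump: what B's inner update does to an entry
def pvBump (e : String) (o : Option (Int × String)) : Option (Int × String) :=
  match o with
  | some co => some (co.1 + 1, co.2)
  | none => some (1, e)

theorem get?_inner_fold (e : String) (ts : List String) :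
    ∀ (_ : ts.Nodup) (occ : PySem.Dict String (Int × String)) (k : String),
    (ts.foldl (fun occ t =>
        occ.insert t (match occ.get? t with
          | some co => (co.1 + 1, co.2)
          | none => (1, e))) occ).get? k
      = if k ∈ ts then pvBump e (occ.get? k) else occ.get? k := by
  induction ts with
  | nil => intro _ occ k; simp
  | cons t ts ih =>
    intro hnd occ k
    obtain ⟨ht, hts⟩ := List.nodup_cons.mp hnd
    rw [List.foldl_cons, ih hts]
    by_cases hk : k = t
    · subst hk
      have hkts : k ∉ ts := ht
      simp only [hkts, if_false, List.mem_cons, true_or, if_true]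
      rw [PySem.Dict.get?_insert_self]
      cases occ.get? k <;> rfl
    · rw [PySem.Dict.get?_insert_of_ne _ _ hk]
      simp only [List.mem_cons, hk, false_or]

-- B's occurrence table, characterised: get? k folds pvBump over the items containing k
theorem get?_occ (ps : List (String × List String))
    (occ : PySem.Dict String (Int × String)) (k : String) :
    (ps.foldl (fun occ p =>
        (PySem.Set.ofList p.2).foldl (fun occ t =>
          occ.insert t (match occ.get? t with
            | some co => (co.1 + 1, co.2)
            | none => (1, p.1))) occ) occ).get? k
      = (ps.filter (fun p => decide (k ∈ p.2))).foldl (fun o q => pvBump q.1 o) (occ.get? k) := by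
  induction ps generalizing occ with
  | nil => rfl
  | cons p ps ih =>
    rw [List.foldl_cons, ih, get?_inner_fold p.1 _ (PySem.Set.nodup_ofList p.2)]
    by_cases hm : k ∈ p.2
    · have hmem : k ∈ PySem.Set.ofList p.2 := (PySem.Set.mem_ofList _ _).mpr hm
      simp [hm, hmem]
    · have hmem : k ∉ PySem.Set.ofList p.2 := fun h => hm ((PySem.Set.mem_ofList _ _).mp h)
      simp [hm, hmem]

theorem foldl_pvBump_some (qs : List (String × List String)) (c : Int) (o : String) :
    qs.foldl (fun o q => pvBump q.1 o) (some (c, o)) = some (c + qs.length, o) := by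
  induction qs generalizing c with
  | nil => simp
  | cons hd tl ih =>
    rw [List.foldl_cons]
    have h1 : pvBump hd.1 (some (c, o)) = some (c + 1, o) := rfl
    rw [h1, ih]
    congr 2
    simp only [List.length_cons]
    push_cast
    ring

theorem nodup_keys_occ (ps : List (String × List String)) (occ : PySem.Dict String (Int × String))
    (h : occ.keys.Nodup) :
    (ps.foldl (fun occ p =>
        (PySem.Set.ofList p.2).foldl (fun occ t =>
          occ.insert t (match occ.get? t with
            | some co => (co.1 + 1, co.2)
            | none => (1, p.1))) occ) occ).keys.Nodup := by
  induction ps generalizing occ with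
  | nil => exact h
  | cons hd tl ih =>
    exact ih _ (PySem.Dict.nodup_keys_foldl_insert _ _ _ h)

theorem keys_occ (ps : List (String × List String)) (occ : PySem.Dict String (Int × String)) :
    (ps.foldl (fun occ p =>
        (PySem.Set.ofList p.2).foldl (fun occ t =>
          occ.insert t (match occ.get? t with
            | some co => (co.1 + 1, co.2)
            | none => (1, p.1))) occ) occ).keys
      = ps.foldl (fun ks p => PySem.Set.update ks (PySem.Set.ofList p.2)) occ.keys := by
  induction ps generalizing occ with
  | nil => rfl
  | cons hd tl ih =>
    simp only [List.foldl_cons]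
    rw [ih, PySem.Dict.keys_foldl_insert]

theorem update_eq_append (xs : List String) :
    ∀ s : List String, (∀ x ∈ xs, x ∉ s) → xs.Nodup → PySem.Set.update s xs = s ++ xs := by
  induction xs with
  | nil => intro s _ _; simp [PySem.Set.update]
  | cons x xs ih =>
    intro s hs hnd
    obtain ⟨hx, hxs⟩ := List.nodup_cons.mp hnd
    have hadd : PySem.Set.add s x = s ++ [x] := by
      have hc : PySem.Set.contains s x = false :=
        Bool.eq_false_iff.mpr (fun h => hs x (List.mem_cons_self) ((PySem.Set.contains_iff _ _).mp h))
      unfold PySem.Set.add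
      rw [hc]
      simp
    have hstep : PySem.Set.update s (x :: xs) = PySem.Set.update (PySem.Set.add s x) xs := rfl
    rw [hstep, hadd, ih (s ++ [x]) (fun y hy => by
      simp only [List.mem_append, List.mem_singleton, not_or]
      exact ⟨hs y (List.mem_cons_of_mem _ hy), fun h => hx (h ▸ hy)⟩) hxs]
    simp

theorem ofList_eq_self_of_nodup (xs : List String) (h : xs.Nodup) :
    PySem.Set.ofList xs = xs := by
  have : PySem.Set.ofList xs = PySem.Set.update [] xs := rfl
  rw [this, update_eq_append xs [] (by simp) h]
  simp


theorem nodup_keys_pvOcc (d : PySem.Dict String (List String)) : (pvOcc d).keys.Nodup := by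
  unfold pvOcc
  exact nodup_keys_occ _ _ (by rw [PySem.Dict.keys_empty]; exact List.nodup_nil)

theorem get?_pvOcc (d : PySem.Dict String (List String)) (hnd : d.keys.Nodup) (x : String) :
    (pvOcc d).get? x
      = match d.keys.filter (fun oe => decide (x ∈ d.getD oe [])) with
        | [] => none
        | w :: ws' => some (1 + ws'.length, w) := by
  unfold pvOcc
  rw [get?_occ, PySem.Dict.get?_empty, PySem.Dict.items_eq_map_keys d hnd [], List.filter_map]
  have hcomp : ((fun p : String × List String => decide (x ∈ p.2))
      ∘ (fun k => (k, d.getD k []))) = fun oe => decide (x ∈ d.getD oe []) := rfl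
  rw [hcomp]
  cases h : d.keys.filter (fun oe => decide (x ∈ d.getD oe [])) with
  | nil => rfl
  | cons w ws' =>
    rw [List.map_cons, List.foldl_cons]
    have h1 : pvBump ((fun k => (k, d.getD k [])) w).1 none = some (1, w) := rfl
    rw [h1, foldl_pvBump_some]
    simp

theorem ws_singleton (d : PySem.Dict String (List String)) (hnd : d.keys.Nodup)
    (e x : String) (he : e ∈ d.keys) :
    (x ∈ d.getD e [] ∧ ∀ oe ∈ d.keys, oe ≠ e → x ∉ d.getD oe [])
      ↔ d.keys.filter (fun oe => decide (x ∈ d.getD oe [])) = [e] := by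
  constructor
  · rintro ⟨h1, h2⟩
    have hmem : ∀ y, y ∈ d.keys.filter (fun oe => decide (x ∈ d.getD oe [])) ↔ y ∈ [e] := by
      intro y
      simp only [List.mem_filter, decide_eq_true_eq, List.mem_singleton]
      constructor
      · rintro ⟨hy, hx⟩
        by_contra hne
        exact h2 y hy hne hx
      · rintro rfl
        exact ⟨he, h1⟩
    exact List.perm_singleton.mp
      ((List.perm_ext_iff_of_nodup (hnd.filter _) (List.nodup_singleton e)).mpr hmem)
  · intro hf
    have h1 : e ∈ d.keys.filter (fun oe => decide (x ∈ d.getD oe [])) := by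
      rw [hf]; exact List.mem_singleton_self e
    have h1' := List.mem_filter.mp h1
    refine ⟨by simpa using h1'.2, ?_⟩
    intro oe hoe hne hx
    have : oe ∈ d.keys.filter (fun oe => decide (x ∈ d.getD oe [])) :=
      List.mem_filter.mpr ⟨hoe, by simpa using hx⟩
    rw [hf] at this
    exact hne (List.mem_singleton.mp this)

theorem keys_pvSets (d : PySem.Dict String (List String)) (hnd : d.keys.Nodup) :
    (pvSets d).keys = d.keys := by
  unfold pvSets
  rw [PySem.Dict.keys_foldl_insert, PySem.Dict.keys_empty]
  exact ofList_eq_self_of_nodup _ hnd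

theorem getD_pvSets (d : PySem.Dict String (List String)) (hnd : d.keys.Nodup)
    {e : String} (he : e ∈ d.keys) :
    (pvSets d).getD e [] = PySem.Set.ofList (d.getD e []) :=
  getD_foldl_insert_self _ _ _ _ _ hnd he

theorem union_eq (d : PySem.Dict String (List String)) (hnd : d.keys.Nodup) :
    pvUnionFold (pvSets d).values PySem.Set.empty = PySem.Set.ofList (pvOcc d).keys := by
  have hoccnd := nodup_keys_pvOcc d
  have hocckeys : (pvOcc d).keys
      = d.items.foldl (fun ks p => PySem.Set.update ks (PySem.Set.ofList p.2)) [] := by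
    unfold pvOcc
    rw [keys_occ, PySem.Dict.keys_empty]
  rw [ofList_eq_self_of_nodup _ hoccnd, hocckeys,
    PySem.Dict.items_eq_map_keys d hnd [], List.foldl_map]
  unfold pvUnionFold
  rw [PySem.Dict.values_eq_map_keys _ ((keys_pvSets d hnd).symm ▸ hnd) [],
    keys_pvSets d hnd, List.foldl_map]
  exact PySem.List.foldl_congr_mem _ _ _ _
    (fun acc e he => by rw [getD_pvSets d hnd he]; rfl)

theorem list_eq (d : PySem.Dict String (List String)) (hnd : d.keys.Nodup)
    {e : String} (he : e ∈ d.keys) :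
    pvSortKey (PySem.Set.diff ((pvSets d).getD e []) (pvOthers d e))
      = pvSortKey (((pvOcc d).items.filter
          (fun q => q.2.1 == 1 && q.2.2 == e)).map (fun q => q.1)) := by
  have hoccnd := nodup_keys_pvOcc d
  apply sorted2_eq_of_perm
  rw [getD_pvSets d hnd he]
  refine (List.perm_ext_iff_of_nodup
    (PySem.Set.nodup_diff _ _ (PySem.Set.nodup_ofList _)) ?_).mpr ?_
  · exact List.Nodup.sublist ((List.filter_sublist).map _) hoccnd
  · intro x
    -- A side: member of e's set and of no other engine's set
    have hA : x ∈ PySem.Set.diff (PySem.Set.ofList (d.getD e [])) (pvOthers d e)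
        ↔ (x ∈ d.getD e [] ∧ ∀ oe ∈ d.keys, oe ≠ e → x ∉ d.getD oe []) := by
      rw [PySem.Set.mem_diff, PySem.Set.mem_ofList]
      unfold pvOthers pvUnionFold
      rw [mem_foldl_union]
      constructor
      · rintro ⟨h1, h2⟩
        refine ⟨h1, fun oe hoe hne hx => h2 (Or.inr ?_)⟩
        exact ⟨PySem.Set.ofList (d.getD oe []),
          List.mem_map.mpr ⟨oe, List.mem_filter.mpr ⟨hoe, by simpa using hne⟩,
            getD_pvSets d hnd hoe⟩, (PySem.Set.mem_ofList _ _).mpr hx⟩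
      · rintro ⟨h1, h2⟩
        refine ⟨h1, ?_⟩
        rintro (h | ⟨l, hl, hx⟩)
        · simp [PySem.Set.empty] at h
        · obtain ⟨oe, hoe', rfl⟩ := List.mem_map.mp hl
          obtain ⟨hoe, hne⟩ := List.mem_filter.mp hoe'
          rw [getD_pvSets d hnd hoe, PySem.Set.mem_ofList] at hx
          exact h2 oe hoe (by simpa using hne) hx
    -- B side: recorded count 1 and owner e
    have hB : x ∈ ((pvOcc d).items.filter
          (fun q => q.2.1 == 1 && q.2.2 == e)).map (fun q => q.1)
        ↔ d.keys.filter (fun oe => decide (x ∈ d.getD oe [])) = [e] := by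
      rw [List.mem_map]
      constructor
      · rintro ⟨q, hq, rfl⟩
        obtain ⟨hqi, hcond⟩ := List.mem_filter.mp hq
        have hget : (pvOcc d).get? q.1 = some q.2 :=
          (PySem.Dict.get?_eq_some_iff_mem_items _ _ _ hoccnd).mpr hqi
        rw [get?_pvOcc d hnd] at hget
        rcases hws : d.keys.filter (fun oe => decide (q.1 ∈ d.getD oe [])) with _ | ⟨w, ws'⟩
        · rw [hws] at hget; cases hget
        · rw [hws] at hget
          have hq2 : q.2 = ((1 + (ws'.length : Int)), w) := (Option.some_inj.mp hget).symm
          simp only [hq2, Bool.and_eq_true, beq_iff_eq] at hcond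
          obtain ⟨hc1, hc2⟩ := hcond
          have hws0 : ws' = [] := by
            have h0 : (ws'.length : Int) = 0 := by omega
            exact List.length_eq_zero_iff.mp (by exact_mod_cast h0)
          rw [hws0, hc2]
      · intro hf
        refine ⟨(x, (1, e)), List.mem_filter.mpr ⟨?_, by simp⟩, rfl⟩
        refine (PySem.Dict.get?_eq_some_iff_mem_items _ _ _ hoccnd).mp ?_
        rw [get?_pvOcc d hnd, hf]
        simp
    rw [hA, hB, ws_singleton d hnd e x he]

theorem summary_eq (d : PySem.Dict String (List String)) (hnd : d.keys.Nodup) :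
    (d.keys.foldl (fun sm e =>
        sm.insert e (pvSortKey (PySem.Set.diff ((pvSets d).getD e []) (pvOthers d e))))
        PySem.Dict.empty).items
      = (d.items.foldl (fun sm p =>
          sm.insert p.1 (pvSortKey (((pvOcc d).items.filter
            (fun q => q.2.1 == 1 && q.2.2 == p.1)).map (fun q => q.1))))
          PySem.Dict.empty).items := by
  rw [PySem.Dict.items_eq_map_keys d hnd [], List.foldl_map]
  rw [PySem.Dict.items_foldl_insert_fresh d.keys (fun e => e) _ _
    (fun a _ => PySem.Dict.contains_empty a) (by simpa using hnd)]
  rw [show (List.foldl (fun sm e =>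
        sm.insert ((fun k => (k, d.getD k [])) e).1 (pvSortKey (((pvOcc d).items.filter
          (fun q => q.2.1 == 1 && q.2.2 == ((fun k => (k, d.getD k [])) e).1)).map (fun q => q.1))))
        PySem.Dict.empty d.keys)
      = (List.foldl (fun sm e =>
        sm.insert e (pvSortKey (((pvOcc d).items.filter
          (fun q => q.2.1 == 1 && q.2.2 == e)).map (fun q => q.1))))
        PySem.Dict.empty d.keys) from rfl]
  rw [PySem.Dict.items_foldl_insert_fresh d.keys (fun e => e) _ _
    (fun a _ => PySem.Dict.contains_empty a) (by simpa using hnd)]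
  refine congrArg _ (List.map_congr_left ?_)
  intro e he
  rw [list_eq d hnd he]

theorem main_eq (rd : List (String × List String)) : compare_sets rd = compare_sets_alt rd := by
  have hnd := PySem.Dict.nodup_keys_ofList rd
  unfold compare_sets compare_sets_alt
  refine Prod.ext ?_ ?_
  · exact summary_eq _ hnd
  · exact union_eq _ hnd

-- ===== VERDICT (by name: the statement is the Claim_ definition above) =====
theorem compare_sets_spec : Claim_equal_compare_sets := by
  intro rd _
  unfold Spec_compare_sets
  exact main_eq rd
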